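-- pv_equiv track=rewrite | github.com/croyla/kia-live-serverside | src/shared/predict_times.py | _unwrap_trip_minutes
-- ===== SOURCE A (Python) =====
-- from typing import Any, Dict, Iterable, List, Optional, Tuple, Union
--
-- def _unwrap_trip_minutes(times_min: List[int]) -> List[int]:
--     """Unwrap times that may cross midnight so sequence is nondecreasing in minutes."""
--     unwrapped, offset, prev = [], 0, None
--     for t in times_min:
--         if prev is not None and t + offset < prev:
--             offset += 1440
--         val = t + offset
--         unwrapped.append(val)
--         prev = val
--     return unwrapped
-- ===== SOURCE B (Python) =====
-- from typing import List
--
-- def _unwrap_trip_minutes(times_min: List[int]) -> List[int]: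
--     """Unwrap times that may cross midnight so sequence is nondecreasing in minutes.
--
--     Different decomposition: group the input into maximal nondecreasing runs,
--     then shift the k-th run wholesale by k*1440 (each run boundary is exactly one
--     midnight crossing, so every element's offset is 1440 times its run index).
--     """
--     runs: List[List[int]] = []
--     for t in times_min:
--         if runs and runs[-1][-1] <= t:
--             runs[-1].append(t)
--         else:
--             runs.append([t])
--     return [t + 1440 * k for k, run in enumerate(runs) for t in run]
-- ===== Notes on version B (the rewrite author's own statement) =====
-- stated objective: alternative
-- what changed: Replaces A's single pass with a running offset/prev accumulator by a two-stage run decomposition: first group the input into maximal nondecreasing runs, then emit every element of the k-th run shifted by k*1440 (offset = 1440 times the run index, no running offset is maintained).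
import Mathlib
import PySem

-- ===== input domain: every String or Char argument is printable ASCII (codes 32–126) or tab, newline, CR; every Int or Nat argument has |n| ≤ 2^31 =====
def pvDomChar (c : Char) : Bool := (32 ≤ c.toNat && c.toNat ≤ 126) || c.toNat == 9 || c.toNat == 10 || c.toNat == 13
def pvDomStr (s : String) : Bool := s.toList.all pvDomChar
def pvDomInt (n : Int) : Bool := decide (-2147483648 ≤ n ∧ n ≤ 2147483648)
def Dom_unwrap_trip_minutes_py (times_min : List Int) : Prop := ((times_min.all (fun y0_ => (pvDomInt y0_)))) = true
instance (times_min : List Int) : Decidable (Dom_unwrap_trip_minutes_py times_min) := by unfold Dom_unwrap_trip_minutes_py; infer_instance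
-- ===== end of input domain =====

-- B replaces A's running offset/prev pass by a two-stage run decomposition (alternative, same cost).

-- ===== PORT A =====
-- A's loop: state (offset, prev); for each t: if prev set and t+offset < prev then offset += 1440; emit val = t+offset.
def unwrapGoA (offset : Int) (prev : Option Int) : List Int → List Int
  | [] => []
  | t :: ts =>
    let offset' : Int :=
      match prev with
      | some p => if t + offset < p then offset + 1440 else offset
      | none => offset
    let val := t + offset'
    val :: unwrapGoA offset' (some val) ts

def unwrap_trip_minutes_py (times_min : List Int) : List Int :=
  unwrapGoA 0 none times_min

-- ===== PORT B =====
-- one step of B's grouping loop: append t to the last run if runs[-1][-1] <= t, else start a new run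
def addRun (runs : List (List Int)) (t : Int) : List (List Int) :=
  match runs.getLast? with
  | none => runs ++ [[t]]
  | some run =>
    match run.getLast? with
    | none => runs ++ [[t]]   -- unreachable: the loop never stores an empty run
    | some v => if v ≤ t then runs.dropLast ++ [run ++ [t]] else runs ++ [[t]]

-- [t + 1440*k for k, run in enumerate(runs) for t in run]
def unwrap_trip_minutes_py_alt (times_min : List Int) : List Int :=
  let runs := times_min.foldl addRun []
  (PySem.List.enumerate runs).flatMap (fun kr => kr.2.map (fun t => t + 1440 * kr.1))

-- ===== PRECONDITION & SPEC =====
def Spec_unwrap_trip_minutes_py (times_min : List Int) (out : List Int) : Prop := out = unwrap_trip_minutes_py_alt times_min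
instance (times_min : List Int) (out : List Int) : Decidable (Spec_unwrap_trip_minutes_py times_min out) := by unfold Spec_unwrap_trip_minutes_py; infer_instance

-- ===== CLAIM =====
def Claim_equal_unwrap_trip_minutes_py : Prop := ∀ (times_min : List Int), Dom_unwrap_trip_minutes_py times_min → Spec_unwrap_trip_minutes_py times_min (unwrap_trip_minutes_py times_min)

-- ===== LEMMAS AND PROOFS =====
-- B's output map on a runs state
def flattenShift (S : List (List Int)) : List Int :=
  (PySem.List.enumerate S).flatMap (fun kr => kr.2.map (fun t => t + 1440 * kr.1))

-- reference recursion: raw previous element p, current run index k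
def refRun (p k : Int) : List Int → List Int
  | [] => []
  | t :: ts => if t < p then (t + 1440 * (k + 1)) :: refRun t (k + 1) ts
               else (t + 1440 * k) :: refRun t k ts

theorem flattenShift_concat (S : List (List Int)) (r : List Int) :
    flattenShift (S ++ [r]) = flattenShift S ++ r.map (fun t => t + 1440 * (S.length : Int)) := by
  unfold flattenShift
  rw [PySem.List.enumerate_append]
  simp [PySem.List.enumerate]

-- A's loop at offset 1440*k with prev = p + 1440*k equals the run-index reference
theorem unwrapGoA_eq_refRun (ts : List Int) : ∀ (p k : Int),
    unwrapGoA (1440 * k) (some (p + 1440 * k)) ts = refRun p k ts := by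
  induction ts with
  | nil => intro p k; rfl
  | cons t ts ih =>
    intro p k
    simp only [unwrapGoA, refRun]
    by_cases h : t < p
    · have hc : t + 1440 * k < p + 1440 * k := by omega
      simp only [if_pos h, if_pos hc]
      rw [show (1440 : Int) * k + 1440 = 1440 * (k + 1) by ring, ih t (k + 1)]
    · have hc : ¬ (t + 1440 * k < p + 1440 * k) := by omega
      simp only [if_neg h, if_neg hc]
      rw [ih t k]

-- reducing one grouping step on a state written as S ++ [run]
theorem addRun_concat (S : List (List Int)) (run : List Int) (t p : Int) (hp : run.getLast? = some p) :
    addRun (S ++ [run]) t = if p ≤ t then S ++ [run ++ [t]] else (S ++ [run]) ++ [[t]] := by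
  unfold addRun
  simp [hp]

-- invariant of B's grouping fold: state S ++ [run], last element of run is p
theorem fold_addRun_inv (ts : List Int) : ∀ (S : List (List Int)) (run : List Int) (p : Int),
    run.getLast? = some p →
    flattenShift (List.foldl addRun (S ++ [run]) ts)
      = flattenShift (S ++ [run]) ++ refRun p (S.length : Int) ts := by
  induction ts with
  | nil => intro S run p _; simp [refRun]
  | cons t ts ih =>
    intro S run p hp
    simp only [List.foldl_cons]
    rw [addRun_concat S run t p hp]
    by_cases h : t < p
    · -- new run started
      rw [if_neg (by omega)]
      rw [ih (S ++ [run]) [t] t (by simp)]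
      rw [flattenShift_concat]
      simp only [refRun, if_pos h, List.map_cons, List.map_nil, List.length_append,
        List.length_cons, List.length_nil]
      push_cast
      simp [List.append_assoc]
    · -- appended to the last run
      rw [if_pos (by omega)]
      rw [ih S (run ++ [t]) t (by simp)]
      rw [flattenShift_concat, flattenShift_concat]
      simp only [refRun, if_neg h, List.map_append, List.map_cons, List.map_nil]
      simp [List.append_assoc]

-- ===== VERDICT =====
theorem unwrap_trip_minutes_py_spec : Claim_equal_unwrap_trip_minutes_py := by
  intro times_min _
  unfold Spec_unwrap_trip_minutes_py unwrap_trip_minutes_py unwrap_trip_minutes_py_alt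
  match times_min with
  | [] => rfl
  | x :: rest =>
    simp only [List.foldl_cons]
    have h0 : addRun [] x = [[x]] := by unfold addRun; rfl
    rw [h0]
    have hinv := fold_addRun_inv rest [] [x] x (by simp)
    simp only [List.nil_append, List.length_nil, Nat.cast_zero] at hinv
    show unwrapGoA 0 none (x :: rest) = flattenShift (List.foldl addRun [[x]] rest)
    rw [hinv]
    simp only [unwrapGoA]
    have hA : unwrapGoA (1440 * 0) (some (x + 1440 * 0)) rest = refRun x 0 rest :=
      unwrapGoA_eq_refRun rest x 0
    simp only [show (1440 : Int) * 0 = 0 by ring, add_zero] at hA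
    rw [show x + (0:Int) = x by ring, hA]
    unfold flattenShift
    simp [PySem.List.enumerate]
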